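-- pv_equiv track=rewrite | github.com/leann-z/bilstm-ctc-timit | visualizations.py | collapse_ctc_labels
-- ===== SOURCE A (Python) =====
-- def collapse_ctc_labels(ext_labels, blank_id, idx2phn):
--     phones, prev = [], None
--     for lab in ext_labels:
--         if lab == blank_id:
--             prev = lab
--             continue
--         if prev is None or lab != prev:
--             phones.append(idx2phn[lab])
--         prev = lab
--     return phones
-- ===== SOURCE B (Python) =====
-- def collapse_ctc_labels(ext_labels, blank_id, idx2phn):
--     heads = [cur for prev, cur in zip([None] + list(ext_labels), ext_labels) if cur != prev]
--     return [idx2phn[k] for k in heads if k != blank_id]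
-- ===== Notes on version B (the rewrite author's own statement) =====
-- stated objective: simpler
-- what changed: Replaces the manual prev-tracking state machine with two comprehensions: a zip-against-shifted-self pass that keeps run heads (drops consecutive duplicates), then a filter-and-map that drops blanks and looks up phones.
import Mathlib
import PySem

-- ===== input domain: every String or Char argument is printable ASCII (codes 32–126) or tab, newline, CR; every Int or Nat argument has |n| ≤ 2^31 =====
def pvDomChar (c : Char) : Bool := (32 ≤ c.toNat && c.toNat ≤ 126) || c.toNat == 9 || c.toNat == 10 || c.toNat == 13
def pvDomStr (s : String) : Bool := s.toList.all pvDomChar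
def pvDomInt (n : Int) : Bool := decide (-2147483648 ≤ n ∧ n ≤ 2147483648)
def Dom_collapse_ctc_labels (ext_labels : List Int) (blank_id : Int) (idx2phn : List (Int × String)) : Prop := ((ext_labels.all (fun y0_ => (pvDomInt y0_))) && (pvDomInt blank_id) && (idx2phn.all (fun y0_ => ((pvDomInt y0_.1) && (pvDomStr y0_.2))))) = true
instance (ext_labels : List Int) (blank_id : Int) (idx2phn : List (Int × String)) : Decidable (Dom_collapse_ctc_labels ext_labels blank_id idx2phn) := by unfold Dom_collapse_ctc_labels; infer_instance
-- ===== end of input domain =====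

-- B replaces A's prev-tracking state machine by two comprehensions (zip against the
-- shifted list to keep run heads, then filter blanks and look up) — objective: simpler.

-- ===== PORT A =====
-- A's dict lookup idx2phn[lab] raises KeyError when the key is missing; inside
-- Pre_ the key is always present, so the total form getD is exact there.
def collapse_ctc_labels (ext_labels : List Int) (blank_id : Int) (idx2phn : List (Int × String)) : List String :=
  (ext_labels.foldl
    (fun (st : List String × Option Int) lab =>
      if lab = blank_id then (st.1, some lab)
      else if st.2 = none ∨ some lab ≠ st.2 then (st.1 ++ [(idx2phn.lookup lab).getD ""], some lab)
      else (st.1, some lab))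
    ([], none)).1

-- ===== PORT B =====
def collapse_ctc_labels_alt (ext_labels : List Int) (blank_id : Int) (idx2phn : List (Int × String)) : List String :=
  let heads := ((none :: ext_labels.map some).zip ext_labels).filterMap
    (fun pc => if some pc.2 ≠ pc.1 then some pc.2 else none)
  heads.filterMap (fun k => if k ≠ blank_id then some ((idx2phn.lookup k).getD "") else none)

-- ===== PRECONDITION & SPEC =====
-- Pre_ excludes exactly the inputs on which Python A raises KeyError: a non-blank
-- label occurring in ext_labels that is not a key of idx2phn (B raises there too).
def Pre_collapse_ctc_labels (ext_labels : List Int) (blank_id : Int) (idx2phn : List (Int × String)) : Prop :=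
  ∀ lab ∈ ext_labels, lab ≠ blank_id → ((idx2phn.lookup lab)).isSome = true
instance (ext_labels : List Int) (blank_id : Int) (idx2phn : List (Int × String)) : Decidable (Pre_collapse_ctc_labels ext_labels blank_id idx2phn) := by unfold Pre_collapse_ctc_labels; infer_instance

def pvWitness_collapse_ctc_labels : List Int × Int × (List (Int × String)) :=
  ([1, 1, 0, 2, 2, 1], 0, [(1, "aa"), (2, "eh")])

def Spec_collapse_ctc_labels (ext_labels : List Int) (blank_id : Int) (idx2phn : List (Int × String)) (out : List String) : Prop := out = collapse_ctc_labels_alt ext_labels blank_id idx2phn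
instance (ext_labels : List Int) (blank_id : Int) (idx2phn : List (Int × String)) (out : List String) : Decidable (Spec_collapse_ctc_labels ext_labels blank_id idx2phn out) := by unfold Spec_collapse_ctc_labels; infer_instance

-- ===== CLAIM (what is proved, stated in full; the proofs are below) =====
def Claim_equal_collapse_ctc_labels : Prop := ∀ (ext_labels : List Int) (blank_id : Int) (idx2phn : List (Int × String)), Dom_collapse_ctc_labels ext_labels blank_id idx2phn → Pre_collapse_ctc_labels ext_labels blank_id idx2phn → Spec_collapse_ctc_labels ext_labels blank_id idx2phn (collapse_ctc_labels ext_labels blank_id idx2phn)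

-- ===== LEMMAS AND PROOFS =====

-- Loop invariant: A's fold from state (acc, p) appends exactly B's group-then-filter
-- result computed with p as the pending "previous" element.
theorem foldA_eq (blank_id : Int) (idx2phn : List (Int × String)) :
    ∀ (l : List Int) (p : Option Int) (acc : List String),
    (l.foldl
      (fun (st : List String × Option Int) lab =>
        if lab = blank_id then (st.1, some lab)
        else if st.2 = none ∨ some lab ≠ st.2 then (st.1 ++ [(idx2phn.lookup lab).getD ""], some lab)
        else (st.1, some lab))
      (acc, p)).1
    = acc ++ (((p :: l.map some).zip l).filterMap
        (fun pc => if some pc.2 ≠ pc.1 then some pc.2 else none)).filterMap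
        (fun k => if k ≠ blank_id then some ((idx2phn.lookup k).getD "") else none) := by
  intro l
  induction l with
  | nil => intro p acc; simp
  | cons x xs ih =>
    intro p acc
    by_cases hx : x = blank_id
    · subst hx
      by_cases h : some x = p
      · simp [h, ih]
      · simp [h, ih]
    · by_cases hp : some x ≠ p
      · simp [hx, hp, ih]
      · have hpn : p ≠ none := by
          intro h; exact hp (by simp [h])
        simp only [List.foldl_cons, List.map_cons, List.zip_cons_cons, List.filterMap_cons]
        rw [if_neg hx, if_neg (by simp [hp, hpn] : ¬(p = none ∨ some x ≠ p))]
        simp [hp, ih]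

-- ===== VERDICT (by name: the statement is the Claim_ definition above) =====
theorem collapse_ctc_labels_spec : Claim_equal_collapse_ctc_labels := by
  intro ext_labels blank_id idx2phn _ _
  unfold Spec_collapse_ctc_labels collapse_ctc_labels collapse_ctc_labels_alt
  rw [foldA_eq]
  simp
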